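-- pv_equiv track=rewrite | github.com/Fondamenti18/fondamenti-di-programmazione | students/1757012/homework04/program01.py | trovasottoalbero
-- ===== SOURCE A (Python) =====
-- def trovasottoalbero(albero, valore):
--     dic={}
--     a=0
--     try:
--         a=albero[valore]
--     except:
--         pass
--     if a==0:
--         return {}
--     if a==[]:
--         return {valore: a}
--     else:
--         dic[valore]=a
--         for w in a:
--             valore=w
--             z=trovasottoalbero(albero, valore)
--             dic.update(z)
--         return dic
-- ===== SOURCE B (Python) =====
-- def trovasottoalbero(albero, valore):
--     diz = {}
--     stack = [valore]
--     while stack: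
--         v = stack.pop()
--         if v in diz or v not in albero:
--             continue
--         figli = albero[v]
--         diz[v] = figli
--         stack.extend(reversed(figli))
--     return diz
-- ===== Notes on version B (the rewrite author's own statement) =====
-- stated objective: alternative
-- what changed: A recursively builds a fresh dict for every subtree and merges them with dict.update at each level (re-copying each subtree once per ancestor, re-exploring shared nodes); B is a non-recursive explicit-stack preorder loop over one result dict that doubles as the visited set, inserting each reachable node exactly once.
import Mathlib
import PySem

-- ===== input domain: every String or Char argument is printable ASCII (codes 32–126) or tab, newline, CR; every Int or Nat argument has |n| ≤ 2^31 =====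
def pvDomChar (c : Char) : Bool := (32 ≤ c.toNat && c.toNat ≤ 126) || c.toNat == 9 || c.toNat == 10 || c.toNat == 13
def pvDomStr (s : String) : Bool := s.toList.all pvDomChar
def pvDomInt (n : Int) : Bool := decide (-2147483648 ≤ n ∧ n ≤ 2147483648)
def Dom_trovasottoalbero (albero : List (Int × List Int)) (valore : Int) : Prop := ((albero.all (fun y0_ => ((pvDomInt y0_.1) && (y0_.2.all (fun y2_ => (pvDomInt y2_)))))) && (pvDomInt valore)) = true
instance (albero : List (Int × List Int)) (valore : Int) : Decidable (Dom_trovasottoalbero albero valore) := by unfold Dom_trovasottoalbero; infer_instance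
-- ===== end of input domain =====

-- B replaces A's recursive per-subtree dict building and dict.update merging by one
-- non-recursive explicit-stack preorder loop over a single result dict that doubles as
-- the visited set, inserting each reachable node exactly once.
-- Equivalence is about return values; neither function mutates its arguments.

-- ===== PORT A =====
-- A's recursion is ported with a fuel argument; under Pre_ (no cycle reachable from
-- valore) the recursion depth is at most the number of keys, so fuel (length+1) is never
-- exhausted and the port computes exactly what the Python computes.
def trovaAux : Nat → List (Int × List Int) → Int → PySem.Dict Int (List Int)
  | 0, _, _ => PySem.Dict.mk []
  | n + 1, albero, valore =>
    match (PySem.Dict.mk albero).get? valore with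
    | none => PySem.Dict.mk []                               -- a stays 0: return {}
    | some a =>
      if a = [] then PySem.Dict.mk [(valore, a)]             -- return {valore: a}
      else                                                    -- dic[valore]=a; for w in a: dic.update(...)
        a.foldl (fun dic w => dic.update (trovaAux n albero w).items) (PySem.Dict.mk [(valore, a)])

def trovasottoalbero (albero : List (Int × List Int)) (valore : Int) : List (Int × List Int) :=
  (trovaAux (albero.length + 1) albero valore).items

-- ===== PORT B =====
-- termination measure of B's while loop: number of albero keys not yet in the dict
def pvUnvis (albero : List (Int × List Int)) (ks : List Int) : Nat :=
  ((albero.map Prod.fst).filter (fun k => decide (k ∉ ks))).length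

theorem pv_filter_le {α : Type} (l : List α) (p q : α → Bool)
    (h : ∀ x, q x = true → p x = true) : (l.filter q).length ≤ (l.filter p).length := by
  induction l with
  | nil => simp
  | cons a t ih =>
    cases hq : q a
    · cases hp : p a <;> simp [hq, hp] <;> omega
    · simp [hq, h a hq]
      omega

theorem pv_filter_lt {α : Type} (l : List α) (p q : α → Bool)
    (h : ∀ x, q x = true → p x = true) (v : α) (hv : v ∈ l)
    (hp : p v = true) (hq : q v = false) :
    (l.filter q).length < (l.filter p).length := by
  induction l with
  | nil => simp at hv
  | cons a t ih =>
    rcases List.mem_cons.mp hv with he | hm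
    · subst he
      simp [hp, hq]
      exact pv_filter_le t p q h
    · have hlt := ih hm
      cases hqa : q a
      · cases hpa : p a <;> simp [hqa, hpa] <;> omega
      · simp [hqa, h a hqa]
        omega

theorem pv_get_mem_keysA {albero : List (Int × List Int)} {x : Int} {c : List Int}
    (h : (PySem.Dict.mk albero).get? x = some c) : x ∈ albero.map Prod.fst := by
  cases hf : List.find? (fun p => p.1 == x) albero with
  | none => simp [PySem.Dict.get?, hf] at h
  | some p =>
    have hp := List.mem_of_find?_eq_some hf
    have hbe := List.find?_some hf
    exact List.mem_map.mpr ⟨p, hp, by simpa using hbe⟩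

theorem pv_unvis_insert_lt {albero : List (Int × List Int)} {diz : PySem.Dict Int (List Int)}
    {v : Int} {figli : List Int} (hc : ¬ diz.contains v = true)
    (hg : (PySem.Dict.mk albero).get? v = some figli) :
    pvUnvis albero (diz.insert v figli).keys < pvUnvis albero diz.keys := by
  have hnk : v ∉ diz.keys := fun hm => hc ((PySem.Dict.contains_iff_mem_keys diz v).mpr hm)
  have hcb : diz.contains v = false := by
    cases h : diz.contains v
    · rfl
    · exact absurd h hc
  have hkeys : (diz.insert v figli).keys = diz.keys ++ [v] := by
    simp [PySem.Dict.keys, PySem.Dict.items_insert_of_not_contains diz figli hcb]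
  unfold pvUnvis
  rw [hkeys]
  have himp : ∀ x : Int, (decide (x ∉ diz.keys ++ [v]) : Bool) = true →
      (decide (x ∉ diz.keys) : Bool) = true := by
    intro x hx
    simp at hx ⊢
    exact hx.1
  exact pv_filter_lt _ _ _ himp v (pv_get_mem_keysA hg) (by simp [hnk]) (by simp)

-- B's while loop: pop v from the stack; skip it if already in the dict or not a key;
-- otherwise insert it and push its children (stack.extend(reversed(figli)) with the
-- list end as top of stack = figli ++ rest with the list head as top of stack).
def dfsStack (albero : List (Int × List Int)) : List Int → PySem.Dict Int (List Int) → PySem.Dict Int (List Int)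
  | [], diz => diz
  | v :: rest, diz =>
    if h : diz.contains v then dfsStack albero rest diz
    else
      match hfig : (PySem.Dict.mk albero).get? v with
      | none => dfsStack albero rest diz
      | some figli => dfsStack albero (figli ++ rest) (diz.insert v figli)
termination_by stack diz => (pvUnvis albero diz.keys, stack.length)
decreasing_by
  · exact Prod.Lex.right _ (Nat.lt_succ_self _)
  · exact Prod.Lex.right _ (Nat.lt_succ_self _)
  · exact Prod.Lex.left _ _ (pv_unvis_insert_lt h hfig)

def trovasottoalbero_alt (albero : List (Int × List Int)) (valore : Int) : List (Int × List Int) :=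
  (dfsStack albero [valore] (PySem.Dict.mk [])).items

-- ===== PRECONDITION & SPEC =====
-- helpers for Pre_: bounded-iteration closure of the child relation of the input graph
def pvNbrs (albero : List (Int × List Int)) (x : Int) : List Int :=
  ((PySem.Dict.mk albero).get? x).getD []
def pvStep (albero : List (Int × List Int)) (S : List Int) : List Int :=
  PySem.List.dedup (S ++ S.flatMap (pvNbrs albero))
def pvClosed (albero : List (Int × List Int)) (S : List Int) : Prop :=
  ∀ x ∈ S, ∀ y ∈ pvNbrs albero x, y ∈ S
def pvIterN (albero : List (Int × List Int)) : Nat :=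
  albero.length + (albero.map (fun p => p.2.length)).sum + 1
def pvReachC (albero : List (Int × List Int)) (valore : Int) : List Int :=
  (pvStep albero)^[pvIterN albero] [valore]
def pvDown (albero : List (Int × List Int)) (v : Int) : List Int :=
  (pvStep albero)^[pvIterN albero] (pvNbrs albero v)

-- Pre_ excludes exactly the inputs on which A's unbounded recursion never returns (Python
-- raises RecursionError): those where a cycle of the child relation is reachable from valore.
def Pre_trovasottoalbero (albero : List (Int × List Int)) (valore : Int) : Prop :=
  pvClosed albero (pvReachC albero valore) ∧
  ∀ v ∈ pvReachC albero valore, ((PySem.Dict.mk albero).get? v).isSome →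
    pvClosed albero (pvDown albero v) ∧ v ∉ pvDown albero v
instance (albero : List (Int × List Int)) (valore : Int) : Decidable (Pre_trovasottoalbero albero valore) := by
  unfold Pre_trovasottoalbero pvClosed; infer_instance

def pvWitness_trovasottoalbero : (List (Int × List Int)) × Int := ([(1, [2, 3]), (3, [])], 1)

def Spec_trovasottoalbero (albero : List (Int × List Int)) (valore : Int) (out : List (Int × List Int)) : Prop := out = trovasottoalbero_alt albero valore
instance (albero : List (Int × List Int)) (valore : Int) (out : List (Int × List Int)) : Decidable (Spec_trovasottoalbero albero valore out) := by unfold Spec_trovasottoalbero; infer_instance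

-- ===== CLAIM (what is proved, stated in full; the proofs are below) =====
def Claim_equal_trovasottoalbero : Prop := ∀ (albero : List (Int × List Int)) (valore : Int), Dom_trovasottoalbero albero valore → Pre_trovasottoalbero albero valore → Spec_trovasottoalbero albero valore (trovasottoalbero albero valore)


-- ===== LEMMAS AND PROOFS =====

-- proof-only bridge: the RECURSIVE one-dict DFS; dfsStack is proved equal to folding it
-- over the stack, and it in turn is proved equal to A's trovaAux under Pre_.
def visitaAux : Nat → List (Int × List Int) → Int → PySem.Dict Int (List Int) → PySem.Dict Int (List Int)
  | 0, _, _, out => out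
  | n + 1, albero, v, out =>
    if out.contains v then out
    else
      match (PySem.Dict.mk albero).get? v with
      | none => out
      | some figli =>
        figli.foldl (fun o w => visitaAux n albero w o) (out.insert v figli)

-- keys only grow along visitaAux
theorem pv_vis_keys (albero : List (Int × List Int)) :
    ∀ (f : Nat) (v : Int) (d : PySem.Dict Int (List Int)),
    ∃ l, (visitaAux f albero v d).keys = d.keys ++ l := by
  intro f
  induction f with
  | zero => intro v d; exact ⟨[], by simp [visitaAux]⟩
  | succ f ih =>
    intro v d
    by_cases hc : d.contains v = true
    · exact ⟨[], by simp [visitaAux, hc]⟩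
    · have hcb : d.contains v = false := by
        cases h : d.contains v
        · rfl
        · exact absurd h hc
      cases hg : (PySem.Dict.mk albero).get? v with
      | none => exact ⟨[], by simp [visitaAux, hcb, hg]⟩
      | some figli =>
        have hkeys : (d.insert v figli).keys = d.keys ++ [v] := by
          simp [PySem.Dict.keys, PySem.Dict.items_insert_of_not_contains d figli hcb]
        have FOLD : ∀ (L : List Int) (acc : PySem.Dict Int (List Int)),
            (∃ l0, acc.keys = d.keys ++ l0) →
            ∃ l, (L.foldl (fun o w => visitaAux f albero w o) acc).keys = d.keys ++ l := by
          intro L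
          induction L with
          | nil => intro acc h; exact h
          | cons w t iht =>
            intro acc ⟨l0, hl0⟩
            obtain ⟨l1, hl1⟩ := ih w acc
            exact iht _ ⟨l0 ++ l1, by rw [hl1, hl0, List.append_assoc]⟩
        have heq : visitaAux (f + 1) albero v d
            = figli.foldl (fun o w => visitaAux f albero w o) (d.insert v figli) := by
          simp [visitaAux, hcb, hg]
        rw [heq]
        exact FOLD figli _ ⟨[v], hkeys⟩

theorem pv_unvis_ext_le (albero : List (Int × List Int)) (ks l : List Int) :
    pvUnvis albero (ks ++ l) ≤ pvUnvis albero ks := by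
  apply pv_filter_le
  intro x hx
  simp at hx ⊢
  exact hx.1

theorem pv_unvis_vis_le (albero : List (Int × List Int)) (f : Nat) (v : Int)
    (d : PySem.Dict Int (List Int)) :
    pvUnvis albero (visitaAux f albero v d).keys ≤ pvUnvis albero d.keys := by
  obtain ⟨l, hl⟩ := pv_vis_keys albero f v d
  rw [hl]
  exact pv_unvis_ext_le albero d.keys l

theorem pv_unvis_pos {albero : List (Int × List Int)} {v : Int} {ks : List Int}
    (hm : v ∈ albero.map Prod.fst) (hnk : v ∉ ks) : 0 < pvUnvis albero ks := by
  unfold pvUnvis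
  have : v ∈ (albero.map Prod.fst).filter (fun k => decide (k ∉ ks)) :=
    List.mem_filter.mpr ⟨hm, by simp [hnk]⟩
  exact List.length_pos_of_mem this

-- the result of visitaAux does not depend on the fuel once it exceeds the unvisited count
theorem pv_vis_fuel (albero : List (Int × List Int)) :
    ∀ (n : Nat) (d : PySem.Dict Int (List Int)), pvUnvis albero d.keys ≤ n →
    ∀ f1 f2, pvUnvis albero d.keys < f1 → pvUnvis albero d.keys < f2 →
    ∀ v, visitaAux f1 albero v d = visitaAux f2 albero v d := by
  intro n
  induction n with
  | zero =>
    intro d h0 f1 f2 h1 h2 v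
    obtain ⟨g1, rfl⟩ : ∃ g, f1 = g + 1 := ⟨f1 - 1, by omega⟩
    obtain ⟨g2, rfl⟩ : ∃ g, f2 = g + 1 := ⟨f2 - 1, by omega⟩
    by_cases hc : d.contains v = true
    · simp [visitaAux, hc]
    · have hcb : d.contains v = false := by
        cases h : d.contains v
        · rfl
        · exact absurd h hc
      cases hg : (PySem.Dict.mk albero).get? v with
      | none => simp [visitaAux, hcb, hg]
      | some figli =>
        exfalso
        have hnk : v ∉ d.keys := fun hm => hc ((PySem.Dict.contains_iff_mem_keys d v).mpr hm)
        have := pv_unvis_pos (pv_get_mem_keysA hg) hnk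
        omega
  | succ n ih =>
    intro d h0 f1 f2 h1 h2 v
    obtain ⟨g1, rfl⟩ : ∃ g, f1 = g + 1 := ⟨f1 - 1, by omega⟩
    obtain ⟨g2, rfl⟩ : ∃ g, f2 = g + 1 := ⟨f2 - 1, by omega⟩
    by_cases hc : d.contains v = true
    · simp [visitaAux, hc]
    · have hcb : d.contains v = false := by
        cases h : d.contains v
        · rfl
        · exact absurd h hc
      cases hg : (PySem.Dict.mk albero).get? v with
      | none => simp [visitaAux, hcb, hg]
      | some figli =>
        have hlt : pvUnvis albero (d.insert v figli).keys < pvUnvis albero d.keys :=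
          pv_unvis_insert_lt hc hg
        have FOLD : ∀ (L : List Int) (acc : PySem.Dict Int (List Int)),
            pvUnvis albero acc.keys ≤ pvUnvis albero (d.insert v figli).keys →
            L.foldl (fun o w => visitaAux g1 albero w o) acc
              = L.foldl (fun o w => visitaAux g2 albero w o) acc := by
          intro L
          induction L with
          | nil => intro acc _; rfl
          | cons w t iht =>
            intro acc hacc
            have hstep : visitaAux g1 albero w acc = visitaAux g2 albero w acc := by
              apply ih acc (by omega) g1 g2 (by omega) (by omega)
            rw [List.foldl_cons, List.foldl_cons, hstep]
            apply iht
            exact le_trans (pv_unvis_vis_le albero g2 w acc) hacc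
        simp only [visitaAux, hcb, hg]
        exact FOLD figli _ le_rfl

-- folding visitaAux with adaptive fuel equals folding it with any big enough fixed fuel
theorem pv_fold_fuel (albero : List (Int × List Int)) (F : Nat) :
    ∀ (L : List Int) (acc : PySem.Dict Int (List Int)), pvUnvis albero acc.keys < F →
    L.foldl (fun o w => visitaAux (pvUnvis albero o.keys + 1) albero w o) acc
      = L.foldl (fun o w => visitaAux F albero w o) acc := by
  intro L
  induction L with
  | nil => intro acc _; rfl
  | cons w t ih =>
    intro acc hF
    have hstep : visitaAux (pvUnvis albero acc.keys + 1) albero w acc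
        = visitaAux F albero w acc :=
      pv_vis_fuel albero (pvUnvis albero acc.keys) acc le_rfl _ F (Nat.lt_succ_self _) hF w
    rw [List.foldl_cons, List.foldl_cons, hstep]
    exact ih _ (lt_of_le_of_lt (pv_unvis_vis_le albero F w acc) hF)

-- B's stack loop equals folding the recursive DFS over the stack
theorem pv_stack_eq (albero : List (Int × List Int)) :
    ∀ (stack : List Int) (diz : PySem.Dict Int (List Int)),
    dfsStack albero stack diz
      = stack.foldl (fun dd w => visitaAux (pvUnvis albero dd.keys + 1) albero w dd) diz := by
  intro stack diz
  fun_induction dfsStack albero stack diz with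
  | case1 diz => rfl
  | case2 v rest diz h ih =>
    rw [List.foldl_cons]
    have hv : visitaAux (pvUnvis albero diz.keys + 1) albero v diz = diz := by
      simp [visitaAux, h]
    rw [hv]
    exact ih
  | case3 v rest diz h hg ih =>
    rw [List.foldl_cons]
    have hcb : diz.contains v = false := by
      cases hb : diz.contains v
      · rfl
      · exact absurd hb h
    have hv : visitaAux (pvUnvis albero diz.keys + 1) albero v diz = diz := by
      simp [visitaAux, hcb, hg]
    rw [hv]
    exact ih
  | case4 v rest diz h figli hg ih =>
    rw [List.foldl_cons]
    have hcb : diz.contains v = false := by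
      cases hb : diz.contains v
      · rfl
      · exact absurd hb h
    have hv : visitaAux (pvUnvis albero diz.keys + 1) albero v diz
        = figli.foldl (fun o w => visitaAux (pvUnvis albero diz.keys) albero w o)
            (diz.insert v figli) := by
      simp [visitaAux, hcb, hg]
    rw [hv, ih, List.foldl_append]
    congr 1
    exact pv_fold_fuel albero (pvUnvis albero diz.keys) figli (diz.insert v figli)
      (pv_unvis_insert_lt h hg)

-- the edge relation of the input graph, its reflexive-transitive closure, acyclicity, rank
def pvEe (albero : List (Int × List Int)) (x y : Int) : Prop :=
  ∃ c, (PySem.Dict.mk albero).get? x = some c ∧ y ∈ c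
def pvER (albero : List (Int × List Int)) : Int → Int → Prop := Relation.ReflTransGen (pvEe albero)
def pvNoCyc (albero : List (Int × List Int)) (valore : Int) : Prop :=
  ∀ x, pvER albero valore x → ¬ Relation.TransGen (pvEe albero) x x
noncomputable def pvRank (albero : List (Int × List Int)) (v : Int) : Nat :=
  (@Finset.filter Int (fun w => pvER albero v w) (fun _ => Classical.propDecidable _)
    (albero.map Prod.fst).toFinset).card

-- dict invariant: keys distinct, every stored value is that key's child list in albero
def pvGoodD (albero : List (Int × List Int)) (d : PySem.Dict Int (List Int)) : Prop :=
  d.keys.Nodup ∧ ∀ p ∈ d.items, (PySem.Dict.mk albero).get? p.1 = some p.2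

theorem pv_insert_mem {d : PySem.Dict Int (List Int)} {k : Int} {v : List Int}
    (hnd : d.keys.Nodup) (h : (k, v) ∈ d.items) : d.insert k v = d := by
  have hk : k ∈ d.keys := List.mem_map.mpr ⟨(k, v), h, rfl⟩
  have hc : d.contains k = true := (PySem.Dict.contains_iff_mem_keys d k).mpr hk
  have hgv : d.get? k = some v := PySem.Dict.get?_of_mem_items d h hnd
  apply PySem.Dict.ext
  rw [PySem.Dict.items_insert_of_contains d v hc]
  have hcong : List.map (fun p => if (p.1 == k) = true then (k, v) else p) d.items
      = List.map id d.items := by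
    apply List.map_congr_left
    intro p hp
    obtain ⟨p1, p2⟩ := p
    by_cases he : p1 = k
    · subst he
      have hg2 : d.get? p1 = some p2 := PySem.Dict.get?_of_mem_items d hp hnd
      have : v = p2 := by
        rw [hgv] at hg2; exact Option.some.inj hg2
      simp [this]
    · simp [he]
  rw [hcong, List.map_id]

theorem pv_insert_fresh (d : PySem.Dict Int (List Int)) (k : Int) (v : List Int)
    (h : k ∉ d.keys) : (d.insert k v).items = d.items ++ [(k, v)] := by
  have hc : d.contains k = false := by
    cases hcb : d.contains k
    · rfl
    · exact absurd ((PySem.Dict.contains_iff_mem_keys d k).mp hcb) h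
  exact PySem.Dict.items_insert_of_not_contains d v hc

theorem pv_update_items (albero : List (Int × List Int)) :
    ∀ (z : List (Int × List Int)) (d : PySem.Dict Int (List Int)),
    pvGoodD albero d → (∀ p ∈ z, (PySem.Dict.mk albero).get? p.1 = some p.2) →
    (z.map Prod.fst).Nodup →
    (d.update z).items = d.items ++ z.filter (fun p => !(d.contains p.1)) := by
  intro z
  induction z with
  | nil => intro d _ _ _; simp [PySem.Dict.update]
  | cons p rest ih =>
    intro d hd hv hn
    have hrestv : ∀ q ∈ rest, (PySem.Dict.mk albero).get? q.1 = some q.2 :=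
      fun q hq => hv q (List.mem_cons_of_mem _ hq)
    have hpv := hv p List.mem_cons_self
    rw [List.map_cons, List.nodup_cons] at hn
    obtain ⟨hp1, hnr⟩ := hn
    have hstep : d.update (p :: rest) = (d.insert p.1 p.2).update rest := rfl
    rw [hstep]
    by_cases hc : p.1 ∈ d.keys
    · have hpmem : (p.1, p.2) ∈ d.items := by
        obtain ⟨q, hq, hq1⟩ := List.mem_map.mp hc
        have hdq : d.get? q.1 = some q.2 := PySem.Dict.get?_of_mem_items d (by
          exact (Prod.mk.eta (p := q)) ▸ hq) hd.1
        have halb : (PySem.Dict.mk albero).get? q.1 = some q.2 := hd.2 q hq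
        rw [hq1] at hdq halb
        rw [hpv] at halb
        have hdq2 : d.get? p.1 = some p.2 := by
          rw [Option.some.inj halb]; exact hdq
        exact PySem.Dict.mem_items_of_get?_eq_some _ hdq2
      rw [pv_insert_mem hd.1 hpmem, ih d hd hrestv hnr]
      have hct : d.contains p.1 = true := (PySem.Dict.contains_iff_mem_keys d p.1).mpr hc
      simp [hct]
    · have hfit := pv_insert_fresh d p.1 p.2 hc
      have hkeys' : (d.insert p.1 p.2).keys = d.keys ++ [p.1] := by
        simp [PySem.Dict.keys, hfit]
      have hd' : pvGoodD albero (d.insert p.1 p.2) := by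
        constructor
        · rw [hkeys']
          rw [List.nodup_append]
          refine ⟨hd.1, by simp, ?_⟩
          intro x hx y hy he
          rw [List.mem_singleton] at hy
          subst hy; subst he; exact hc hx
        · intro q hq
          rw [hfit] at hq
          rcases List.mem_append.mp hq with hq | hq
          · exact hd.2 q hq
          · rw [List.mem_singleton] at hq; subst hq; exact hpv
      rw [ih _ hd' hrestv hnr, hfit]
      have hcb : d.contains p.1 = false := by
        cases hcb : d.contains p.1
        · rfl
        · exact absurd ((PySem.Dict.contains_iff_mem_keys d p.1).mp hcb) hc
      have hfc : rest.filter (fun q => !((d.insert p.1 p.2).contains q.1))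
          = rest.filter (fun q => !(d.contains q.1)) := by
        apply List.filter_congr
        intro q hq
        have hne : q.1 ≠ p.1 := by
          intro he; exact hp1 (he ▸ List.mem_map.mpr ⟨q, hq, rfl⟩)
        rw [PySem.Dict.contains_insert]
        simp [hne]
      rw [hfc]
      simp [hcb]

theorem pv_upd_good {albero : List (Int × List Int)} {d z : PySem.Dict Int (List Int)}
    (hd : pvGoodD albero d) (hz : pvGoodD albero z) :
    pvGoodD albero (d.update z.items) ∧
    (∀ k, k ∈ (d.update z.items).keys ↔ k ∈ d.keys ∨ k ∈ z.keys) := by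
  have hit := pv_update_items albero z.items d hd hz.2 hz.1
  have hsubl : List.Sublist ((z.items.filter (fun p => !(d.contains p.1))).map Prod.fst) z.keys :=
    List.Sublist.map _ List.filter_sublist
  have hkeys : (d.update z.items).keys
      = d.keys ++ (z.items.filter (fun p => !(d.contains p.1))).map Prod.fst := by
    simp [PySem.Dict.keys, hit]
  have hdisj : ∀ k ∈ (z.items.filter (fun p => !(d.contains p.1))).map Prod.fst, k ∉ d.keys := by
    intro k hk hkd
    obtain ⟨q, hq, hq1⟩ := List.mem_map.mp hk
    have := List.of_mem_filter hq
    rw [hq1] at this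
    rw [(PySem.Dict.contains_iff_mem_keys d k).mpr hkd] at this
    simp at this
  refine ⟨⟨?_, ?_⟩, ?_⟩
  · rw [hkeys]
    rw [List.nodup_append]
    refine ⟨hd.1, hsubl.nodup hz.1, ?_⟩
    intro x hx y hy he
    exact hdisj y hy (he ▸ hx)
  · intro p hp
    rw [hit] at hp
    rcases List.mem_append.mp hp with hp | hp
    · exact hd.2 p hp
    · exact hz.2 p (List.mem_of_mem_filter hp)
  · intro k
    rw [hkeys, List.mem_append]
    constructor
    · rintro (hk | hk)
      · exact Or.inl hk
      · obtain ⟨q, hq, hq1⟩ := List.mem_map.mp hk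
        exact Or.inr (hq1 ▸ List.mem_map.mpr ⟨q, List.mem_of_mem_filter hq, rfl⟩)
    · rintro (hk | hk)
      · exact Or.inl hk
      · by_cases hkd : k ∈ d.keys
        · exact Or.inl hkd
        · obtain ⟨q, hq, hq1⟩ := List.mem_map.mp hk
          refine Or.inr (List.mem_map.mpr ⟨q, List.mem_filter.mpr ⟨hq, ?_⟩, hq1⟩)
          have hcb : d.contains q.1 = false := by
            cases hcb : d.contains q.1
            · rfl
            · exact absurd ((PySem.Dict.contains_iff_mem_keys d q.1).mp hcb) (hq1 ▸ hkd)
          simp [hcb]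

theorem pv_upd_sub {albero : List (Int × List Int)} {d z : PySem.Dict Int (List Int)}
    (hd : pvGoodD albero d) (hz : pvGoodD albero z)
    (hsub : ∀ k ∈ z.keys, k ∈ d.keys) : d.update z.items = d := by
  apply PySem.Dict.ext
  rw [pv_update_items albero z.items d hd hz.2 hz.1]
  have : z.items.filter (fun p => !(d.contains p.1)) = [] := by
    rw [List.filter_eq_nil_iff]
    intro q hq
    have hqk : q.1 ∈ d.keys := hsub q.1 (List.mem_map.mpr ⟨q, hq, rfl⟩)
    rw [(PySem.Dict.contains_iff_mem_keys d q.1).mpr hqk]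
    simp
  rw [this, List.append_nil]

theorem pv_upd_assoc {albero : List (Int × List Int)} {d z1 z2 : PySem.Dict Int (List Int)}
    (hd : pvGoodD albero d) (h1 : pvGoodD albero z1) (h2 : pvGoodD albero z2) :
    (d.update z1.items).update z2.items = d.update ((z1.update z2.items).items) := by
  have h12 : pvGoodD albero (z1.update z2.items) := (pv_upd_good h1 h2).1
  have hA : pvGoodD albero (d.update z1.items) := (pv_upd_good hd h1).1
  apply PySem.Dict.ext
  rw [pv_update_items albero z2.items (d.update z1.items) hA h2.2 h2.1,
      pv_update_items albero z1.items d hd h1.2 h1.1,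
      pv_update_items albero (z1.update z2.items).items d hd h12.2 h12.1,
      pv_update_items albero z2.items z1 h1 h2.2 h2.1,
      List.filter_append, List.append_assoc]
  congr 1
  congr 1
  rw [List.filter_filter]
  apply List.filter_congr
  intro q hq
  have hmem := (pv_upd_good hd h1).2 q.1
  cases hc : (d.update z1.items).contains q.1
  · have hnm : q.1 ∉ (d.update z1.items).keys := by
      intro h
      rw [(PySem.Dict.contains_iff_mem_keys _ q.1).mpr h] at hc
      simp at hc
    have hq1 : q.1 ∉ d.keys := fun h => hnm ((hmem).mpr (Or.inl h))
    have hq2 : q.1 ∉ z1.keys := fun h => hnm ((hmem).mpr (Or.inr h))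
    have hc1 : d.contains q.1 = false := by
      cases hcb : d.contains q.1
      · rfl
      · exact absurd ((PySem.Dict.contains_iff_mem_keys d q.1).mp hcb) hq1
    have hc2 : z1.contains q.1 = false := by
      cases hcb : z1.contains q.1
      · rfl
      · exact absurd ((PySem.Dict.contains_iff_mem_keys z1 q.1).mp hcb) hq2
    simp [hc1, hc2]
  · have hk := (hmem).mp ((PySem.Dict.contains_iff_mem_keys _ q.1).mp hc)
    rcases hk with hk | hk
    · have hc1 : d.contains q.1 = true := (PySem.Dict.contains_iff_mem_keys d q.1).mpr hk
      simp [hc1]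
    · have hc2 : z1.contains q.1 = true := (PySem.Dict.contains_iff_mem_keys z1 q.1).mpr hk
      simp [hc2]

theorem pv_AF_good (albero : List (Int × List Int)) :
    ∀ (n : Nat) (v : Int), pvGoodD albero (trovaAux n albero v) ∧
      ∀ k ∈ (trovaAux n albero v).keys,
        pvER albero v k ∧ ((PySem.Dict.mk albero).get? k).isSome := by
  intro n
  induction n with
  | zero =>
    intro v
    refine ⟨⟨List.nodup_nil, by intro p hp; simp [trovaAux] at hp⟩, ?_⟩
    intro k hk
    simp [trovaAux, PySem.Dict.keys] at hk
  | succ n ih =>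
    intro v
    cases hg : (PySem.Dict.mk albero).get? v with
    | none =>
      refine ⟨⟨by simp [trovaAux, hg, PySem.Dict.keys], by intro p hp; simp [trovaAux, hg] at hp⟩, ?_⟩
      intro k hk
      simp [trovaAux, hg, PySem.Dict.keys] at hk
    | some a =>
      have hinit : pvGoodD albero (PySem.Dict.mk [(v, a)]) ∧
          ∀ k ∈ (PySem.Dict.mk [(v, a)]).keys, pvER albero v k ∧ ((PySem.Dict.mk albero).get? k).isSome := by
        refine ⟨⟨by simp [PySem.Dict.keys], ?_⟩, ?_⟩
        · intro p hp; simp at hp; rw [hp]; exact hg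
        · intro k hk
          simp [PySem.Dict.keys] at hk
          subst hk
          exact ⟨Relation.ReflTransGen.refl, by simp [hg]⟩
      by_cases ha : a = []
      · subst ha
        have heq : trovaAux (n + 1) albero v = PySem.Dict.mk [(v, [])] := by
          simp [trovaAux, hg]
        rw [heq]
        exact hinit
      · have heq : trovaAux (n + 1) albero v
            = a.foldl (fun dic w => dic.update (trovaAux n albero w).items) (PySem.Dict.mk [(v, a)]) := by
          simp [trovaAux, hg, ha]
        rw [heq]
        have FG : ∀ (l : List Int), (∀ w ∈ l, w ∈ a) →
            ∀ dic, pvGoodD albero dic →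
            (∀ k ∈ dic.keys, pvER albero v k ∧ ((PySem.Dict.mk albero).get? k).isSome) →
            pvGoodD albero (l.foldl (fun dic w => dic.update (trovaAux n albero w).items) dic) ∧
            ∀ k ∈ (l.foldl (fun dic w => dic.update (trovaAux n albero w).items) dic).keys,
              pvER albero v k ∧ ((PySem.Dict.mk albero).get? k).isSome := by
          intro l
          induction l with
          | nil => intro _ dic h1 h2; exact ⟨h1, h2⟩
          | cons w rest ihl =>
            intro hsub dic h1 h2
            have hw : w ∈ a := hsub w List.mem_cons_self
            have hup := pv_upd_good (albero := albero) h1 (ih w).1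
            refine ihl (fun x hx => hsub x (List.mem_cons_of_mem _ hx)) _ hup.1 ?_
            intro k hk
            rcases (hup.2 k).mp hk with hk | hk
            · exact h2 k hk
            · obtain ⟨hER, hs⟩ := (ih w).2 k hk
              exact ⟨Relation.ReflTransGen.head ⟨a, hg, hw⟩ hER, hs⟩
        exact FG a (fun _ h => h) _ hinit.1 hinit.2

theorem pv_mem_rankFilter (albero : List (Int × List Int)) (v x : Int) :
    x ∈ (@Finset.filter Int (fun w => pvER albero v w) (fun _ => Classical.propDecidable _)
      (albero.map Prod.fst).toFinset) ↔ x ∈ (albero.map Prod.fst).toFinset ∧ pvER albero v x :=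
  @Finset.mem_filter Int (fun w => pvER albero v w) (fun _ => Classical.propDecidable _) _ x

theorem pv_rank_lt {albero : List (Int × List Int)} {valore v w : Int}
    (hnc : pvNoCyc albero valore) (hv : pvER albero valore v) (he : pvEe albero v w) :
    pvRank albero w < pvRank albero v := by
  obtain ⟨c, hgc, hwc⟩ := he
  have hvK : v ∈ albero.map Prod.fst := pv_get_mem_keysA hgc
  unfold pvRank
  apply Finset.card_lt_card
  have hsub : (@Finset.filter Int (fun x => pvER albero w x) (fun _ => Classical.propDecidable _)
      (albero.map Prod.fst).toFinset) ⊆ (@Finset.filter Int (fun x => pvER albero v x)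
      (fun _ => Classical.propDecidable _) (albero.map Prod.fst).toFinset) := by
    intro x hx
    rw [pv_mem_rankFilter] at hx ⊢
    exact ⟨hx.1, Relation.ReflTransGen.head ⟨c, hgc, hwc⟩ hx.2⟩
  rw [Finset.ssubset_iff_of_subset hsub]
  refine ⟨v, ?_, ?_⟩
  · rw [pv_mem_rankFilter]
    exact ⟨List.mem_toFinset.mpr hvK, Relation.ReflTransGen.refl⟩
  · rw [pv_mem_rankFilter]
    rintro ⟨-, hwv⟩
    exact hnc v hv (Relation.TransGen.head' ⟨c, hgc, hwc⟩ hwv)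

theorem pv_fold_mem (albero : List (Int × List Int)) (n : Nat) :
    ∀ (l : List Int) (dic : PySem.Dict Int (List Int)), pvGoodD albero dic →
    ∀ {k : Int}, (k ∈ dic.keys ∨ ∃ w ∈ l, k ∈ (trovaAux n albero w).keys) →
    k ∈ (l.foldl (fun dic w => dic.update (trovaAux n albero w).items) dic).keys := by
  intro l
  induction l with
  | nil =>
    intro dic _ k hk
    rcases hk with hk | ⟨w, hw, _⟩
    · exact hk
    · simp at hw
  | cons w rest ihl =>
    intro dic hdic k hk
    have hup := pv_upd_good hdic (pv_AF_good albero n w).1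
    apply ihl _ hup.1
    rcases hk with hk | ⟨w', hw', hkw⟩
    · exact Or.inl ((hup.2 k).mpr (Or.inl hk))
    · rcases List.mem_cons.mp hw' with he | hr
      · subst he
        exact Or.inl ((hup.2 k).mpr (Or.inr hkw))
      · exact Or.inr ⟨w', hr, hkw⟩

theorem pv_AF_complete {albero : List (Int × List Int)} {valore : Int}
    (hnc : pvNoCyc albero valore) :
    ∀ (n : Nat) (v : Int), pvER albero valore v → pvRank albero v ≤ n →
    ∀ k, pvER albero v k → ((PySem.Dict.mk albero).get? k).isSome →
      k ∈ (trovaAux n albero v).keys := by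
  intro n
  induction n with
  | zero =>
    intro v hv hr k hk hks
    exfalso
    obtain ⟨c, hc⟩ := Option.isSome_iff_exists.mp hks
    have hkK : k ∈ albero.map Prod.fst := pv_get_mem_keysA hc
    have hpos : 0 < pvRank albero v := by
      unfold pvRank
      exact Finset.card_pos.mpr ⟨k, (pv_mem_rankFilter albero v k).mpr ⟨List.mem_toFinset.mpr hkK, hk⟩⟩
    omega
  | succ n ih =>
    intro v hv hr k hk hks
    rcases Relation.ReflTransGen.cases_head hk with hkv | ⟨w, hew, hwk⟩
    · subst hkv
      obtain ⟨a, hg⟩ := Option.isSome_iff_exists.mp hks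
      by_cases ha : a = []
      · subst ha
        have heq : trovaAux (n + 1) albero v = PySem.Dict.mk [(v, [])] := by
          simp [trovaAux, hg]
        rw [heq]
        simp [PySem.Dict.keys]
      · have heq : trovaAux (n + 1) albero v
            = a.foldl (fun dic w => dic.update (trovaAux n albero w).items) (PySem.Dict.mk [(v, a)]) := by
          simp [trovaAux, hg, ha]
        rw [heq]
        apply pv_fold_mem albero n a _ (by
          refine ⟨by simp [PySem.Dict.keys], ?_⟩
          intro p hp; simp at hp; rw [hp]; exact hg)
        exact Or.inl (by simp [PySem.Dict.keys])
    · obtain ⟨c, hgc, hwc⟩ := hew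
      have hrw : pvRank albero w ≤ n := by
        have := pv_rank_lt hnc hv ⟨c, hgc, hwc⟩
        omega
      have hvw : pvER albero valore w := hv.tail ⟨c, hgc, hwc⟩
      by_cases hc0 : c = []
      · subst hc0; simp at hwc
      · have heq : trovaAux (n + 1) albero v
            = c.foldl (fun dic w => dic.update (trovaAux n albero w).items) (PySem.Dict.mk [(v, c)]) := by
          simp [trovaAux, hgc, hc0]
        rw [heq]
        apply pv_fold_mem albero n c _ (by
          refine ⟨by simp [PySem.Dict.keys], ?_⟩
          intro p hp; simp at hp; rw [hp]; exact hgc)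
        exact Or.inr ⟨w, hwc, ih w hvw hrw k hwk hks⟩

theorem pv_gray {albero : List (Int × List Int)} {valore v : Int}
    {d : PySem.Dict Int (List Int)}
    (hnc : pvNoCyc albero valore) (hv : pvER albero valore v)
    (hbg : ∀ x ∈ d.keys, (∀ y, pvEe albero x y → ((PySem.Dict.mk albero).get? y).isSome → y ∈ d.keys) ∨
            Relation.TransGen (pvEe albero) x v)
    (hvin : v ∈ d.keys) :
    ∀ y, pvER albero v y → ((PySem.Dict.mk albero).get? y).isSome → y ∈ d.keys := by
  intro y hy
  induction hy with
  | refl => intro _; exact hvin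
  | tail hab hbc ihab =>
    intro hys
    obtain ⟨cb, hgb, hyb⟩ := hbc
    have hbin := ihab (by simp [hgb])
    rcases hbg _ hbin with hcl | htg
    · exact hcl _ ⟨cb, hgb, hyb⟩ hys
    · exact absurd (Relation.TransGen.trans_right hab htg) (hnc v hv)

theorem pv_core {albero : List (Int × List Int)} {valore : Int}
    (hnc : pvNoCyc albero valore) :
    ∀ (n : Nat) (v : Int) (d : PySem.Dict Int (List Int)),
    pvER albero valore v → pvRank albero v ≤ n →
    pvGoodD albero d → (∀ x ∈ d.keys, pvER albero valore x) →
    (∀ x ∈ d.keys, (∀ y, pvEe albero x y → ((PySem.Dict.mk albero).get? y).isSome → y ∈ d.keys) ∨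
      Relation.TransGen (pvEe albero) x v) →
    visitaAux n albero v d = d.update (trovaAux n albero v).items := by
  intro n
  induction n with
  | zero =>
    intro v d _ _ _ _ _
    simp [visitaAux, trovaAux, PySem.Dict.update]
  | succ n ih =>
    intro v d hve hr hd hd2 hbg
    by_cases hin : d.contains v = true
    · have hvin : v ∈ d.keys := (PySem.Dict.contains_iff_mem_keys d v).mp hin
      have hAg := pv_AF_good albero (n + 1) v
      have hsub : ∀ k ∈ (trovaAux (n + 1) albero v).keys, k ∈ d.keys := by
        intro k hk
        obtain ⟨hER, hs⟩ := hAg.2 k hk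
        exact pv_gray hnc hve hbg hvin k hER hs
      rw [pv_upd_sub hd hAg.1 hsub]
      simp [visitaAux, hin]
    · have hinb : d.contains v = false := by
        cases h : d.contains v
        · rfl
        · exact absurd h hin
      cases hg : (PySem.Dict.mk albero).get? v with
      | none =>
        simp [visitaAux, hinb, hg, trovaAux, PySem.Dict.update]
      | some a =>
        by_cases ha : a = []
        · subst ha
          have hBeq : visitaAux (n + 1) albero v d = d.insert v [] := by
            simp [visitaAux, hinb, hg]
          have hAeq : trovaAux (n + 1) albero v = PySem.Dict.mk [(v, [])] := by
            simp [trovaAux, hg]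
          rw [hBeq, hAeq]
          rfl
        · have hBeq : visitaAux (n + 1) albero v d
              = a.foldl (fun o w => visitaAux n albero w o) (d.insert v a) := by
            simp [visitaAux, hinb, hg]
          have hAeq : trovaAux (n + 1) albero v
              = a.foldl (fun dic w => dic.update (trovaAux n albero w).items) (PySem.Dict.mk [(v, a)]) := by
            simp [trovaAux, hg, ha]
          rw [hBeq, hAeq]
          have hinitG : pvGoodD albero (PySem.Dict.mk [(v, a)]) := by
            refine ⟨by simp [PySem.Dict.keys], ?_⟩
            intro p hp; simp at hp; rw [hp]; exact hg
          have FOLD : ∀ (l : List Int), (∀ w ∈ l, w ∈ a) →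
              ∀ (acc : PySem.Dict Int (List Int)), pvGoodD albero acc →
              v ∈ acc.keys →
              (∀ x ∈ acc.keys, pvER albero v x) →
              (∀ x ∈ acc.keys, x = v ∨ (∀ y, pvEe albero x y → ((PySem.Dict.mk albero).get? y).isSome → y ∈ acc.keys)) →
              l.foldl (fun o w => visitaAux n albero w o) (d.update acc.items)
                = d.update ((l.foldl (fun dic w => dic.update (trovaAux n albero w).items) acc).items) := by
            intro l
            induction l with
            | nil => intro _ acc _ _ _ _; rfl
            | cons w rest ihl =>
              intro hsubl acc hacc hvacc hreach hbg2
              have hw : w ∈ a := hsubl w List.mem_cons_self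
              have hew : pvEe albero v w := ⟨a, hg, hw⟩
              have hERw : pvER albero valore w := hve.tail hew
              have hrw : pvRank albero w ≤ n := by
                have := pv_rank_lt hnc hve hew
                omega
              have hup := pv_upd_good hd hacc
              have hstep : visitaAux n albero w (d.update acc.items)
                  = (d.update acc.items).update (trovaAux n albero w).items := by
                apply ih w _ hERw hrw hup.1
                · intro x hx
                  rcases (hup.2 x).mp hx with hx | hx
                  · exact hd2 x hx
                  · exact hve.trans (hreach x hx)
                · intro x hx
                  rcases (hup.2 x).mp hx with hx | hx
                  · rcases hbg x hx with hcl | htg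
                    · refine Or.inl ?_
                      intro y hy hys
                      exact (hup.2 y).mpr (Or.inl (hcl y hy hys))
                    · exact Or.inr (htg.tail hew)
                  · rcases hbg2 x hx with he | hcl
                    · subst he; exact Or.inr (Relation.TransGen.single hew)
                    · refine Or.inl ?_
                      intro y hy hys
                      exact (hup.2 y).mpr (Or.inr (hcl y hy hys))
              have hAFg := pv_AF_good albero n w
              have hup2 := pv_upd_good hacc hAFg.1
              rw [List.foldl_cons, List.foldl_cons, hstep, pv_upd_assoc hd hacc hAFg.1]
              apply ihl (fun x hx => hsubl x (List.mem_cons_of_mem _ hx)) _ hup2.1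
              · exact (hup2.2 v).mpr (Or.inl hvacc)
              · intro x hx
                rcases (hup2.2 x).mp hx with hx | hx
                · exact hreach x hx
                · exact Relation.ReflTransGen.head hew (hAFg.2 x hx).1
              · intro x hx
                rcases (hup2.2 x).mp hx with hx | hx
                · rcases hbg2 x hx with he | hcl
                  · exact Or.inl he
                  · refine Or.inr ?_
                    intro y hy hys
                    exact (hup2.2 y).mpr (Or.inl (hcl y hy hys))
                · refine Or.inr ?_
                  intro y hy hys
                  refine (hup2.2 y).mpr (Or.inr ?_)
                  have hwx : pvER albero w x := (hAFg.2 x hx).1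
                  exact pv_AF_complete hnc n w hERw hrw y (hwx.tail hy) hys
          have hstart : d.insert v a = d.update (PySem.Dict.mk [(v, a)]).items := rfl
          rw [hstart]
          apply FOLD a (fun _ h => h) _ hinitG
          · simp [PySem.Dict.keys]
          · intro x hx
            simp [PySem.Dict.keys] at hx
            subst hx
            exact Relation.ReflTransGen.refl
          · intro x hx
            simp [PySem.Dict.keys] at hx
            exact Or.inl hx

theorem pv_iter_mem (albero : List (Int × List Int)) :
    ∀ (m : Nat) (S : List Int) (x : Int), x ∈ S → x ∈ (pvStep albero)^[m] S := by
  intro m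
  induction m with
  | zero => intro S x h; simpa using h
  | succ m ihm =>
    intro S x h
    rw [Function.iterate_succ_apply]
    apply ihm
    simp [pvStep]
    exact Or.inl h

theorem pv_pre_nocyc {albero : List (Int × List Int)} {valore : Int}
    (hPre : Pre_trovasottoalbero albero valore) : pvNoCyc albero valore := by
  obtain ⟨hCcl, hPre2⟩ := hPre
  have hC : ∀ x, pvER albero valore x → x ∈ pvReachC albero valore := by
    intro x hx
    induction hx with
    | refl => exact pv_iter_mem albero _ [valore] valore (by simp)
    | tail hab hbc ihx =>
      obtain ⟨c, hgb, hxc⟩ := hbc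
      apply hCcl _ ihx
      simp [pvNbrs, hgb]
      exact hxc
  intro x hx hcyc
  have hxC := hC x hx
  obtain ⟨y, hxy, hyx⟩ := Relation.TransGen.head'_iff.mp hcyc
  obtain ⟨c, hgx, hyc⟩ := hxy
  obtain ⟨hDcl, hxD⟩ := hPre2 x hxC (by simp [hgx])
  have hyD : y ∈ pvDown albero x := by
    apply pv_iter_mem
    simp [pvNbrs, hgx]
    exact hyc
  have hall : ∀ z, pvER albero y z → z ∈ pvDown albero x := by
    intro z hz
    induction hz with
    | refl => exact hyD
    | tail hab hbc ihz =>
      obtain ⟨cb, hgb, hzc⟩ := hbc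
      apply hDcl _ ihz
      simp [pvNbrs, hgb]
      exact hzc
  exact hxD (hall x hyx)

theorem pv_unvis_empty (albero : List (Int × List Int)) :
    pvUnvis albero (PySem.Dict.mk ([] : List (Int × List Int))).keys = albero.length := by
  unfold pvUnvis
  have hk : (PySem.Dict.mk ([] : List (Int × List Int))).keys = [] := by
    simp [PySem.Dict.keys]
  rw [hk]
  simp

-- ===== VERDICT (by name: the statement is the Claim_ definition above) =====
theorem trovasottoalbero_spec : Claim_equal_trovasottoalbero := by
  intro albero valore _ hPre
  unfold Spec_trovasottoalbero trovasottoalbero trovasottoalbero_alt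
  have hBalt : dfsStack albero [valore] (PySem.Dict.mk [])
      = visitaAux (albero.length + 1) albero valore (PySem.Dict.mk []) := by
    rw [pv_stack_eq albero [valore] (PySem.Dict.mk []), List.foldl_cons, List.foldl_nil,
        pv_unvis_empty albero]
  rw [hBalt]
  have hnc := pv_pre_nocyc hPre
  have hemp : pvGoodD albero (PySem.Dict.mk []) := ⟨List.nodup_nil, by intro p hp; simp at hp⟩
  have hr : pvRank albero valore ≤ albero.length + 1 := by
    unfold pvRank
    refine le_trans (@Finset.card_filter_le Int (albero.map Prod.fst).toFinset
      (fun w => pvER albero valore w) (fun _ => Classical.propDecidable _)) ?_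
    have h2 := List.toFinset_card_le (albero.map Prod.fst)
    simp at h2
    omega
  have hcore := pv_core hnc (albero.length + 1) valore (PySem.Dict.mk [])
    Relation.ReflTransGen.refl hr hemp
    (by intro x hx; simp [PySem.Dict.keys] at hx)
    (by intro x hx; simp [PySem.Dict.keys] at hx)
  rw [hcore]
  have hAg := pv_AF_good albero (albero.length + 1) valore
  rw [pv_update_items albero _ _ hemp hAg.1.2 hAg.1.1]
  simp [PySem.Dict.contains]
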